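-- pv_equiv track=rewrite | github.com/JimYin88/ProjectEuler | Problem097.py | last_ten_digits_power2
-- ===== SOURCE A (Python) =====
-- def last_ten_digits_power2(n):
--     """
--     :param n: the nth power of 2
--     :return: the last 10 digit of 2**n
--     """
--     num = 1
--     p = 0
--     while p < n:
--         num *= 2
--         num = num % 10**10
--         p += 1
--
--     return num
-- ===== SOURCE B (Python) =====
-- def last_ten_digits_power2(n):
--     """
--     :param n: the nth power of 2
--     :return: the last 10 digit of 2**n
--     """
--     MOD = 10**10
--     result = 1
--     base = 2
--     e = n
--     while e > 0:
--         if e % 2 == 1: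
--             result = (result * base) % MOD
--         base = (base * base) % MOD
--         e //= 2
--     return result
-- ===== Notes on version B (the rewrite author's own statement) =====
-- stated objective: faster
-- what changed: Replaces the doubling loop that runs n times with hand-written exponentiation by squaring over the bits of n (result/base accumulators mod 10**10).
import Mathlib
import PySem

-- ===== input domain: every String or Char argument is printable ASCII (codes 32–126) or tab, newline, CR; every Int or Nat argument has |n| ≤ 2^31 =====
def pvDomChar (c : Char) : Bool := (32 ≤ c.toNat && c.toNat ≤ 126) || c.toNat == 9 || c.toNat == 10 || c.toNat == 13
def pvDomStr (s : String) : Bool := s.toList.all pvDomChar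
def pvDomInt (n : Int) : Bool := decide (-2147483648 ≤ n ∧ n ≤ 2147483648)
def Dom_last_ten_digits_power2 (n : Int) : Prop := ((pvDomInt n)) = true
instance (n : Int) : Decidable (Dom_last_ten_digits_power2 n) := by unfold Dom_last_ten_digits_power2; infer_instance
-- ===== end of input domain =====

-- B replaces A's n-step doubling loop with exponentiation by squaring over the bits of n (faster: O(log n) vs O(n) multiplications).


-- ===== PORT A =====
-- the 'while p < n' loop of A: num *= 2; num %= 10**10; p += 1
def pvALoop (num p n : Int) : Int :=
  if p < n then pvALoop (PySem.Int.mod (num * 2) (10 ^ 10)) (p + 1) n else num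
termination_by (n - p).toNat
decreasing_by omega

def last_ten_digits_power2 (n : Int) : Int := pvALoop 1 0 n

-- ===== PORT B =====
-- the 'while e > 0' loop of B: if e odd, result = result*base % MOD; base = base*base % MOD; e //= 2
def pvBLoop (result base e : Int) : Int :=
  if 0 < e then
    pvBLoop (if PySem.Int.mod e 2 = 1 then PySem.Int.mod (result * base) (10 ^ 10) else result)
            (PySem.Int.mod (base * base) (10 ^ 10))
            (PySem.Int.floordiv e 2)
  else result
termination_by e.toNat
decreasing_by
  have h2 : PySem.Int.floordiv e 2 = e / 2 := PySem.Int.floordiv_eq_ediv_of_pos (by omega)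
  omega

def last_ten_digits_power2_alt (n : Int) : Int := pvBLoop 1 2 n

-- ===== PRECONDITION & SPEC =====
def Spec_last_ten_digits_power2 (n : Int) (out : Int) : Prop := out = last_ten_digits_power2_alt n
instance (n : Int) (out : Int) : Decidable (Spec_last_ten_digits_power2 n out) := by unfold Spec_last_ten_digits_power2; infer_instance

-- ===== CLAIM (what is proved, stated in full; the proofs are below) =====
def Claim_equal_last_ten_digits_power2 : Prop := ∀ (n : Int), Dom_last_ten_digits_power2 n → Spec_last_ten_digits_power2 n (last_ten_digits_power2 n)

-- ===== LEMMAS AND PROOFS =====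

theorem pvALoop_eq (k : Nat) : ∀ (num p n : Int), (n - p).toNat = k → 0 ≤ num → num < 10 ^ 10 →
    pvALoop num p n = (num * 2 ^ (n - p).toNat) % (10 ^ 10) := by
  induction k with
  | zero =>
    intro num p n hk h0 h1
    rw [pvALoop, if_neg (by omega), hk, pow_zero, mul_one, Int.emod_eq_of_lt h0 h1]
  | succ k ih =>
    intro num p n hk h0 h1
    have hlt : p < n := by omega
    have hm : PySem.Int.mod (num * 2) (10 ^ 10) = (num * 2) % (10 ^ 10) :=
      PySem.Int.mod_eq_emod_of_pos (by norm_num)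
    rw [pvALoop, if_pos hlt, hm,
      ih _ (p + 1) n (by omega) (Int.emod_nonneg _ (by norm_num)) (Int.emod_lt_of_pos _ (by norm_num))]
    have hk2 : (n - p).toNat = (n - (p + 1)).toNat + 1 := by omega
    rw [hk2, Int.mul_emod, Int.emod_emod_of_dvd _ dvd_rfl, ← Int.mul_emod, pow_succ]
    ring_nf

theorem pvBLoop_eq (r b e : Int) : 0 ≤ r → r < 10 ^ 10 →
    pvBLoop r b e = (r * b ^ e.toNat) % (10 ^ 10) := by
  induction r, b, e using pvBLoop.induct with
  | case1 r b e hpos ih =>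
    intro h0 h1
    have hm : ∀ a : Int, PySem.Int.mod a (10 ^ 10) = a % (10 ^ 10) := fun a =>
      PySem.Int.mod_eq_emod_of_pos (by norm_num)
    have hm2 : PySem.Int.mod e 2 = e % 2 := PySem.Int.mod_eq_emod_of_pos (by norm_num)
    have hd : PySem.Int.floordiv e 2 = e / 2 := PySem.Int.floordiv_eq_ediv_of_pos (by norm_num)
    have hpow : ∀ (x : Int) (k : Nat), (x % (10 ^ 10 : Int)) ^ k % (10 ^ 10 : Int) = x ^ k % (10 ^ 10 : Int) :=
      fun x k => Int.ModEq.pow k (Int.emod_emod_of_dvd x dvd_rfl)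
    simp only [hm, hm2, hd] at ih
    rw [pvBLoop, if_pos hpos]
    simp only [hm, hm2, hd]
    by_cases hodd : e % 2 = 1
    · rw [if_pos hodd]
      rw [dif_pos hodd] at ih
      rw [ih (Int.emod_nonneg _ (by norm_num)) (Int.emod_lt_of_pos _ (by norm_num))]
      have hk : e.toNat = 2 * (e / 2).toNat + 1 := by omega
      rw [Int.mul_emod, hpow, Int.emod_emod_of_dvd _ dvd_rfl, ← Int.mul_emod]
      congr 1
      rw [hk, pow_succ, pow_mul, pow_two]
      ring
    · rw [if_neg hodd]
      rw [dif_neg hodd] at ih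
      rw [ih h0 h1]
      have hk : e.toNat = 2 * (e / 2).toNat := by omega
      rw [Int.mul_emod, hpow, ← Int.mul_emod, hk, pow_mul, pow_two]
  | case2 r b e hpos =>
    intro h0 h1
    have hk : e.toNat = 0 := by omega
    rw [pvBLoop, if_neg hpos, hk, pow_zero, mul_one, Int.emod_eq_of_lt h0 h1]

-- ===== VERDICT (by name: the statement is the Claim_ definition above) =====
theorem last_ten_digits_power2_spec : Claim_equal_last_ten_digits_power2 := by
  intro n _
  unfold Spec_last_ten_digits_power2 last_ten_digits_power2 last_ten_digits_power2_alt
  rw [pvALoop_eq (n - 0).toNat 1 0 n rfl (by norm_num) (by norm_num),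
      pvBLoop_eq 1 2 n (by norm_num) (by norm_num)]
  norm_num
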